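-- pv_equiv track=rewrite | github.com/openai/parameter-golf | records/track_non_record_16mb/2026-03-27_Conker5_TandemResidual_MLX/conker5/conker4b.py | _is_identifier_like
-- ===== SOURCE A (Python) =====
-- def _is_identifier_like(core: str, leading_space: bool) -> bool:
--     if not core:
--         return False
--     has_alpha = any(ch.isalpha() for ch in core)
--     has_digit = any(ch.isdigit() for ch in core)
--     has_ident_punct = any(ch in "_-/.:@#" for ch in core)
--     has_inner_upper = (not leading_space) and any(ch.isupper() for ch in core)
--     return (has_alpha and has_digit) or has_ident_punct or has_inner_upper
-- ===== SOURCE B (Python) =====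
-- def _is_identifier_like(core: str, leading_space: bool) -> bool:
--     # Early-exit scan: stop as soon as the answer is known to be True.
--     has_alpha = False
--     has_digit = False
--     for ch in core:
--         if ch in "_-/.:@#":
--             return True
--         if (not leading_space) and ch.isupper():
--             return True
--         if ch.isalpha():
--             has_alpha = True
--         if ch.isdigit():
--             has_digit = True
--         if has_alpha and has_digit:
--             return True
--     return False
-- ===== Notes on version B (the rewrite author's own statement) =====
-- stated objective: alternative
-- what changed: Replaces the four whole-string any() scans plus empty-string guard with a short-circuiting scan that returns True the moment a deciding character is seen (identifier punctuation, an inner uppercase, or the point where both an alpha and a digit have appeared) and False only after exhausting the string, so the string is traversed at most once and often only a prefix.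
import Mathlib
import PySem

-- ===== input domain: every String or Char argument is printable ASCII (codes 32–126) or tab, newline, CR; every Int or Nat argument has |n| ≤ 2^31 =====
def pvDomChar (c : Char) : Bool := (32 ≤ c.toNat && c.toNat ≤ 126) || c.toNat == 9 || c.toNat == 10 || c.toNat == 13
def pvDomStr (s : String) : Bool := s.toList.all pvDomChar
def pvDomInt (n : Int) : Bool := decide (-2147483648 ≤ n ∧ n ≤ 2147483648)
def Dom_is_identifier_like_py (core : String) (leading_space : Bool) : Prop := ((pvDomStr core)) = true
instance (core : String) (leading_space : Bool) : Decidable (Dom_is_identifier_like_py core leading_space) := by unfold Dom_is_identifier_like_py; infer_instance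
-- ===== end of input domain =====

-- B replaces A's four full any() scans with a single short-circuiting scan that returns as soon as the answer is known (alternative control flow, same worst-case cost).


-- ===== PORT A =====
def is_identifier_like_py (core : String) (leading_space : Bool) : Bool :=
  if core.toList.isEmpty then false
  else
    let has_alpha := core.toList.any (fun ch => PySem.Chars.isalpha ch)
    let has_digit := core.toList.any (fun ch => PySem.Chars.isdigit ch)
    let has_ident_punct := core.toList.any (fun ch => "_-/.:@#".toList.contains ch)
    let has_inner_upper := (!leading_space) && core.toList.any (fun ch => PySem.Chars.isupper ch)
    (has_alpha && has_digit) || has_ident_punct || has_inner_upper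

-- ===== PORT B =====
-- the early-exit for-loop of Source B (returning from inside the loop = producing `true` without recursing)
def pvScan : List Char → Bool → Bool → Bool → Bool
  | [], _, _, _ => false
  | ch :: rest, ls, has_alpha, has_digit =>
      if "_-/.:@#".toList.contains ch then true
      else if (!ls) && PySem.Chars.isupper ch then true
      else
        let a' := if PySem.Chars.isalpha ch then true else has_alpha
        let d' := if PySem.Chars.isdigit ch then true else has_digit
        if a' && d' then true else pvScan rest ls a' d'

def is_identifier_like_py_alt (core : String) (leading_space : Bool) : Bool :=
  pvScan core.toList leading_space false false

-- ===== PRECONDITION & SPEC =====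
def Spec_is_identifier_like_py (core : String) (leading_space : Bool) (out : Bool) : Prop := out = is_identifier_like_py_alt core leading_space
instance (core : String) (leading_space : Bool) (out : Bool) : Decidable (Spec_is_identifier_like_py core leading_space out) := by unfold Spec_is_identifier_like_py; infer_instance

-- ===== CLAIM =====
def Claim_equal_is_identifier_like_py : Prop := ∀ (core : String) (leading_space : Bool), Dom_is_identifier_like_py core leading_space → Spec_is_identifier_like_py core leading_space (is_identifier_like_py core leading_space)

-- ===== LEMMAS AND PROOFS =====
theorem pvScan_eq (l : List Char) (ls a d : Bool) (h : (a && d) = false) :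
    pvScan l ls a d =
      (((a || l.any (fun ch => PySem.Chars.isalpha ch)) &&
        (d || l.any (fun ch => PySem.Chars.isdigit ch))) ||
       l.any (fun ch => "_-/.:@#".toList.contains ch) ||
       ((!ls) && l.any (fun ch => PySem.Chars.isupper ch))) := by
  induction l generalizing a d with
  | nil => simpa [pvScan] using h.symm
  | cons ch rest ih =>
      simp only [pvScan, List.any_cons]
      generalize "_-/.:@#".toList.contains ch = p
      generalize PySem.Chars.isupper ch = u
      generalize PySem.Chars.isalpha ch = A
      generalize PySem.Chars.isdigit ch = D
      cases p <;> cases u <;> cases A <;> cases D <;> cases ls <;> cases a <;> cases d <;>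
        simp_all [ih]

-- ===== VERDICT =====
theorem is_identifier_like_py_spec : Claim_equal_is_identifier_like_py := by
  intro core leading_space _
  unfold Spec_is_identifier_like_py is_identifier_like_py is_identifier_like_py_alt
  cases h : core.toList with
  | nil => simp [pvScan]
  | cons c t =>
      rw [pvScan_eq _ _ _ _ rfl]
      simp
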